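-- pv_equiv track=rewrite | github.com/paullabkorea/Algorithm-walk-with-wenivs | 2. 알고리즘 베이스캠프 자료/2기/answer_sample.py | solution
-- ===== SOURCE A (Python) =====
-- def solution(tree):
--     length = len(tree)
--     depth = 0
--     count = 1
--     while True:
--         if count > length:
--             break
--         count *= 2
--         depth += 1
--     return depth
-- ===== SOURCE B (Python) =====
-- def solution(tree):
--     return len(tree).bit_length()
-- ===== Notes on version B (the rewrite author's own statement) =====
-- stated objective: idiomatic
-- what changed: Replaces the doubling loop that counts how many times 1 can be doubled before exceeding len(tree) with the closed form len(tree).bit_length().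
import Mathlib
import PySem

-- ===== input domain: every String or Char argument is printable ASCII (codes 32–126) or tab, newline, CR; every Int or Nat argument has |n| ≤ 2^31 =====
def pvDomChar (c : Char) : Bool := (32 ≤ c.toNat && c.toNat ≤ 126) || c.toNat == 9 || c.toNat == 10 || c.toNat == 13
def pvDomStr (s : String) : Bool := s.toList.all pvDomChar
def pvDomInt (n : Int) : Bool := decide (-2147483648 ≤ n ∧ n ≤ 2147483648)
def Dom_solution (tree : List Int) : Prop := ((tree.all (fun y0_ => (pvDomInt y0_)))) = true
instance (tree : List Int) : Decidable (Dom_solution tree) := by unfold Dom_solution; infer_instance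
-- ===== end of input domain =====

-- B replaces A's doubling loop with the closed form len(tree).bit_length(); same value, no loop (objective: idiomatic).

-- ===== PORT A =====
-- A's `while True` loop: fuel = length+1 is enough iterations (the loop exits after
-- bit_length(length) ≤ length+1 doublings); the fuel only makes the same computation total.
def solutionLoop : Nat → Nat → Nat → Int → Int
  | 0, _, _, depth => depth
  | fuel + 1, length, count, depth =>
      if count > length then depth
      else solutionLoop fuel length (count * 2) (depth + 1)

def solution (tree : List Int) : Int :=
  solutionLoop (tree.length + 1) tree.length 1 0

-- ===== PORT B =====
-- len(tree).bit_length() = Nat.size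
def solution_alt (tree : List Int) : Int :=
  (Nat.size tree.length : Int)

-- ===== PRECONDITION & SPEC =====
def Spec_solution (tree : List Int) (out : Int) : Prop := out = solution_alt tree
instance (tree : List Int) (out : Int) : Decidable (Spec_solution tree out) := by unfold Spec_solution; infer_instance

-- ===== CLAIM (what is proved, stated in full; the proofs are below) =====
def Claim_equal_solution : Prop := ∀ (tree : List Int), Dom_solution tree → Spec_solution tree (solution tree)

-- ===== LEMMAS AND PROOFS =====
lemma solutionLoop_pow (fuel length d : Nat) (h : length < 2 ^ (d + fuel)) :
    solutionLoop fuel length (2 ^ d) (d : Int) = ((max d (Nat.size length) : Nat) : Int) := by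
  induction fuel generalizing d with
  | zero =>
      simp only [solutionLoop]
      have : Nat.size length ≤ d := Nat.size_le.mpr (by simpa using h)
      omega
  | succ fuel ih =>
      simp only [solutionLoop]
      split_ifs with hgt
      · have : Nat.size length ≤ d := Nat.size_le.mpr hgt
        omega
      · have hle : 2 ^ d ≤ length := Nat.le_of_not_lt hgt
        have hd : d < Nat.size length := Nat.lt_size.mpr hle
        have h2 : (2 : Nat) ^ d * 2 = 2 ^ (d + 1) := by ring
        have h3 : ((d : Int) + 1) = ((d + 1 : Nat) : Int) := by push_cast; ring
        rw [h2, h3, ih (d + 1) (by rw [show d + 1 + fuel = d + (fuel + 1) from by omega]; exact h)]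
        · congr 1
          omega

-- ===== VERDICT (by name: the statement is the Claim_ definition above) =====
theorem solution_spec : Claim_equal_solution := by
  intro tree _
  unfold Spec_solution solution solution_alt
  have h := solutionLoop_pow (tree.length + 1) tree.length 0
    (by
      simp only [Nat.zero_add]
      exact lt_of_lt_of_le Nat.lt_two_pow_self
        (Nat.pow_le_pow_right (by norm_num) (Nat.le_succ _)))
  simpa using h
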